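-- pv_equiv track=rewrite | github.com/amuvarma13/tts-vllm | tokens_decoder.py | dummy_processor
-- ===== SOURCE A (Python) =====
-- def dummy_processor(token_gen):
--     buffer = ""
--     count = 0
--     for token in token_gen:
--         # Append the token (which may be a string of text) to the buffer
--         buffer += token
--         count += 1
--         if count == 7:
--             yield buffer
--             buffer = ""
--             count = 0
--     # Emit any remaining tokens (if fewer than 7)
--     if buffer:
--         yield buffer
-- ===== SOURCE B (Python) =====
-- def dummy_processor(token_gen):
--     # Slice-based chunking: materialize the stream, then join and yield each
--     # full 7-token slice by index (no running counter / incremental buffer).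
--     tokens = list(token_gen)
--     i = 0
--     while len(tokens) - i >= 7:
--         yield "".join(tokens[i:i+7])
--         i += 7
--     rem = "".join(tokens[i:])
--     if rem:
--         yield rem
-- ===== Notes on version B (the rewrite author's own statement) =====
-- stated objective: simpler
-- what changed: Replaces the token-by-token running buffer and counter with slice-based chunking: materialize the token list, repeatedly join and yield tokens[:7] while at least 7 remain, then yield the joined tail if truthy.
import Mathlib
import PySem

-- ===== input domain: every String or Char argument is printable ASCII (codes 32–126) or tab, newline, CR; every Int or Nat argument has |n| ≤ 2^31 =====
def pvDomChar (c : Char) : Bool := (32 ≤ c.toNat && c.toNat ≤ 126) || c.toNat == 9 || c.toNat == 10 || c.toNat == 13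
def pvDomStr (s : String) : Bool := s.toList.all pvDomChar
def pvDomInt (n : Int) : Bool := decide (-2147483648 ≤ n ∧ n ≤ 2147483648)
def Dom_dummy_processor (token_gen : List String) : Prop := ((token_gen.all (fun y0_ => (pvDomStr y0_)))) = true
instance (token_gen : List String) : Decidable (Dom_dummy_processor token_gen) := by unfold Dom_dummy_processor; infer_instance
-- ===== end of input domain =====

-- B replaces A's running buffer+counter with slice-based chunking (same cost, simpler);
-- B materializes the generator eagerly, so laziness (a side effect, not the return value) differs.

-- ===== PORT A =====
-- A's for-loop over the generator with state (buffer, count, emitted so far).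
def dummyALoop (token_gen : List String) (buffer : String) (count : Int) (out : List String) : List String :=
  match token_gen with
  | [] => if buffer ≠ "" then out ++ [buffer] else out
  | token :: rest =>
      let buffer' := buffer ++ token
      let count' := count + 1
      if count' = 7 then dummyALoop rest "" 0 (out ++ [buffer'])
      else dummyALoop rest buffer' count' out

def dummy_processor (token_gen : List String) : List String :=
  dummyALoop token_gen "" 0 []

-- ===== PORT B =====
-- B's while-loop: join and yield tokens[i:i+7] while at least 7 tokens remain past i, then the truthy tail.
def dummyBLoop (tokens : List String) (i : Int) (out : List String) : List String :=
  if 7 ≤ (tokens.length : Int) - i then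
    dummyBLoop tokens (i + 7)
      (out ++ [PySem.Str.join "" (PySem.List.slice tokens (some i) (some (i + 7)))])
  else
    let rem := PySem.Str.join "" (PySem.List.slice tokens (some i) none)
    if rem ≠ "" then out ++ [rem] else out
termination_by ((tokens.length : Int) - i).toNat
decreasing_by omega

def dummy_processor_alt (token_gen : List String) : List String :=
  dummyBLoop token_gen 0 []

-- ===== PRECONDITION & SPEC =====
def Spec_dummy_processor (token_gen : List String) (out : List String) : Prop := out = dummy_processor_alt token_gen
instance (token_gen : List String) (out : List String) : Decidable (Spec_dummy_processor token_gen out) := by unfold Spec_dummy_processor; infer_instance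

-- ===== CLAIM (what is proved, stated in full; the proofs are below) =====
def Claim_equal_dummy_processor : Prop := ∀ (token_gen : List String), Dom_dummy_processor token_gen → Spec_dummy_processor token_gen (dummy_processor token_gen)

-- ===== LEMMAS AND PROOFS =====

-- concatenation of a list of strings, the common form of A's buffer and B's "".join
def concatS (l : List String) : String := l.foldr (· ++ ·) ""

theorem intersperse_nil_flatten (ls : List (List Char)) :
    (List.intersperse ([] : List Char) ls).flatten = ls.flatten := by
  induction ls with
  | nil => rfl
  | cons a l ih => cases l <;> simp_all

theorem chars_join_nil (ls : List (List Char)) : PySem.Chars.join [] ls = ls.flatten := by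
  simp [PySem.Chars.join, List.intercalate, intersperse_nil_flatten]

theorem toList_concatS (l : List String) :
    (concatS l).toList = (l.map String.toList).flatten := by
  induction l with
  | nil => rfl
  | cons t r ih => simp [concatS] at ih ⊢; simp [ih]

theorem joinE (ts : List String) : PySem.Str.join "" ts = concatS ts := by
  apply String.toList_inj.mp
  simp [PySem.Str.join, chars_join_nil, toList_concatS]

theorem concatS_cons (t : String) (r : List String) : concatS (t :: r) = t ++ concatS r := rfl

theorem aLoop_small (c : List String) :
    ∀ (buffer : String) (n : Nat) (out : List String), c.length + n < 7 →
    dummyALoop c buffer (n : Int) out =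
      (if buffer ++ concatS c ≠ "" then out ++ [buffer ++ concatS c] else out) := by
  induction c with
  | nil => intro buffer n out _; simp [dummyALoop, concatS]
  | cons t r ih =>
    intro buffer n out h
    simp only [List.length_cons] at h
    rw [dummyALoop]
    have hne : ¬ ((n : Int) + 1 = 7) := by omega
    simp only [hne, if_false]
    have : (n : Int) + 1 = ((n + 1 : Nat) : Int) := by push_cast; ring
    rw [this, ih (buffer ++ t) (n + 1) out (by omega), concatS_cons, String.append_assoc]

theorem aLoop_chunk (c : List String) :
    ∀ (ts : List String) (buffer : String) (n : Nat) (out : List String),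
    c ≠ [] → c.length + n = 7 →
    dummyALoop (c ++ ts) buffer (n : Int) out =
      dummyALoop ts "" 0 (out ++ [buffer ++ concatS c]) := by
  induction c with
  | nil => intro _ _ _ _ hne _; exact absurd rfl hne
  | cons t r ih =>
    intro ts buffer n out _ hlen
    rw [List.cons_append, dummyALoop]
    by_cases hr : r = []
    · subst hr
      simp only [List.length_cons, List.length_nil] at hlen
      have h7 : (n : Int) + 1 = 7 := by omega
      simp only [h7, List.nil_append]
      simp [concatS]
    · have hrlen : 0 < r.length := List.length_pos_iff.mpr hr
      simp only [List.length_cons] at hlen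
      have hne : ¬ ((n : Int) + 1 = 7) := by omega
      simp only [hne, if_false]
      have : (n : Int) + 1 = ((n + 1 : Nat) : Int) := by push_cast; ring
      rw [this, ih ts (buffer ++ t) (n + 1) out hr (by omega), concatS_cons, String.append_assoc]

theorem main_equiv (n : Nat) : ∀ (tokens : List String) (k : Nat) (out : List String),
    tokens.length - k ≤ n →
    dummyALoop (tokens.drop k) "" 0 out = dummyBLoop tokens (k : Int) out := by
  induction n with
  | zero =>
    intro tokens k out h
    have hnil : tokens.drop k = [] := List.drop_eq_nil_iff.mpr (by omega)
    rw [hnil, dummyBLoop.eq_def, if_neg (by push_cast; omega)]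
    rw [PySem.List.slice_from_natCast, hnil]
    simp [dummyALoop, PySem.Str.join, PySem.Chars.join, List.intercalate]
  | succ n ih =>
    intro tokens k out h
    by_cases h7 : k + 7 ≤ tokens.length
    · have htake : ((tokens.drop k).take 7).length = 7 := by
        simp [List.length_take]; omega
      have hA : dummyALoop (tokens.drop k) "" 0 out
          = dummyALoop (tokens.drop (k + 7)) "" 0
              (out ++ ["" ++ concatS ((tokens.drop k).take 7)]) := by
        conv_lhs => rw [(List.take_append_drop 7 (tokens.drop k)).symm]
        have := aLoop_chunk ((tokens.drop k).take 7) ((tokens.drop k).drop 7) "" 0 out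
          (by intro hnil; rw [hnil] at htake; simp at htake) (by omega)
        simpa [List.drop_drop, Nat.add_comm] using this
      rw [hA, ih tokens (k + 7) _ (by omega)]
      conv_rhs => rw [dummyBLoop.eq_def]
      rw [if_pos (by push_cast; omega)]
      have hcast : (k : Int) + 7 = ((k + 7 : Nat) : Int) := by push_cast; ring
      rw [hcast, PySem.List.slice_natCast]
      have h77 : k + 7 - k = 7 := by omega
      rw [h77]
      simp [joinE]
    · conv_rhs => rw [dummyBLoop.eq_def]
      rw [if_neg (by push_cast; omega), PySem.List.slice_from_natCast]
      have := aLoop_small (tokens.drop k) "" 0 out (by simp [List.length_drop]; omega)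
      simpa [joinE] using this

-- ===== VERDICT (by name: the statement is the Claim_ definition above) =====
theorem dummy_processor_spec : Claim_equal_dummy_processor := by
  intro tg _
  unfold Spec_dummy_processor dummy_processor dummy_processor_alt
  simpa using main_equiv tg.length tg 0 [] (by omega)
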